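-- pv_equiv track=rewrite | github.com/yYorky/AutoKaggle | autokaggle/llm_utils.py | _insert_missing_commas_in_arrays
-- ===== SOURCE A (Python) =====
-- def _insert_missing_commas_in_arrays(payload: str) -> str:
--     result: list[str] = []
--     in_string = False
--     escape = False
--     array_depth = 0
--     last_significant: str | None = None
--
--     for char in payload:
--         if in_string:
--             result.append(char)
--             if escape:
--                 escape = False
--             elif char == "\\":
--                 escape = True
--             elif char == '"':
--                 in_string = False
--                 last_significant = '"'
--             continue
--
--         if char.isspace():
--             result.append(char)
--             continue
--
--         if char == '"':
--             if array_depth > 0 and last_significant in ('}', ']', '"'):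
--                 result.append(",")
--             in_string = True
--             result.append(char)
--             last_significant = char
--             continue
--
--         if char in "{[":
--             if array_depth > 0 and last_significant in ('}', ']', '"'):
--                 result.append(",")
--             result.append(char)
--             last_significant = char
--             if char == "[":
--                 array_depth += 1
--             continue
--
--         if char == "]":
--             array_depth = max(0, array_depth - 1)
--
--         result.append(char)
--         last_significant = char
--
--     return "".join(result)
-- ===== SOURCE B (Python) =====
-- def _insert_missing_commas_in_arrays(payload: str) -> str:
--     out = []
--     depth = 0
--     last = None
--     i = 0
--     n = len(payload)
--     while i < n:
--         c = payload[i]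
--         if c == '"':
--             # consume the whole string literal as one token
--             j = i + 1
--             while j < n:
--                 if payload[j] == '\\':
--                     j += 2
--                 elif payload[j] == '"':
--                     j += 1
--                     break
--                 else:
--                     j += 1
--             j = min(j, n)
--             if depth > 0 and last in ('}', ']', '"'):
--                 out.append(',')
--             out.append(payload[i:j])
--             last = '"'
--             i = j
--         elif c.isspace():
--             j = i
--             while j < n and payload[j].isspace():
--                 j += 1
--             out.append(payload[i:j])
--             i = j
--         else:
--             if c in '{[' and depth > 0 and last in ('}', ']', '"'):
--                 out.append(',')
--             out.append(c)
--             if c == '[':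
--                 depth += 1
--             elif c == ']':
--                 depth = max(0, depth - 1)
--             last = c
--             i += 1
--     return ''.join(out)
-- ===== Notes on version B (the rewrite author's own statement) =====
-- stated objective: alternative
-- what changed: Replaces A's char-at-a-time state machine with in_string/escape booleans by a tokenizer that consumes whole string literals (hand-scanning escapes) and whole whitespace runs as single tokens, keeping only array depth and last significant character across tokens.
import Mathlib
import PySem

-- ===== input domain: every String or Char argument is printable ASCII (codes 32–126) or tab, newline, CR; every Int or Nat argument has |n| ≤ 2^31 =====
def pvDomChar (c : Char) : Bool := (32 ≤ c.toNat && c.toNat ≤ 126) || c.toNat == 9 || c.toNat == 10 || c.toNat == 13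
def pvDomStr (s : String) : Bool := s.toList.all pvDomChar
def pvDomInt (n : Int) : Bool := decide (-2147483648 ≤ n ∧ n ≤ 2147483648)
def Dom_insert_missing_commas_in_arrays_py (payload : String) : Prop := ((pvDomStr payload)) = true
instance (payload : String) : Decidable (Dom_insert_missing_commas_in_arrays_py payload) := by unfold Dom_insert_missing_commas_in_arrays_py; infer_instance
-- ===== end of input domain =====

-- B re-decomposes A's char-by-char string-machine as a tokenizer (whole string literals and
-- whitespace runs consumed as single tokens); same result, alternative decomposition.

-- ===== PORT A =====
-- state: (result, in_string, escape, array_depth, last_significant)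
def stepA : (List Char × Bool × Bool × Int × Option Char) → Char → (List Char × Bool × Bool × Int × Option Char)
  | (res, inStr, esc, depth, last), c =>
    if inStr then
      let res := res ++ [c]
      if esc then (res, inStr, false, depth, last)
      else if c = '\\' then (res, inStr, true, depth, last)
      else if c = '"' then (res, false, esc, depth, some '"')
      else (res, inStr, esc, depth, last)
    else if PySem.Chars.isspace c then (res ++ [c], inStr, esc, depth, last)
    else if c = '"' then
      ((if 0 < depth ∧ (last = some '}' ∨ last = some ']' ∨ last = some '"') then res ++ [','] else res) ++ [c],
        true, esc, depth, some c)
    else if c = '{' ∨ c = '[' then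
      ((if 0 < depth ∧ (last = some '}' ∨ last = some ']' ∨ last = some '"') then res ++ [','] else res) ++ [c],
        inStr, esc, if c = '[' then depth + 1 else depth, some c)
    else
      (res ++ [c], inStr, esc, if c = ']' then max 0 (depth - 1) else depth, some c)

def insert_missing_commas_in_arrays_py (payload : String) : String :=
  String.ofList (List.foldl stepA ([], false, false, 0, none) payload.toList).1

-- ===== PORT B =====
-- chars after an opening quote → (string-literal token up to and including the closing quote
-- — or everything, if unterminated —, remaining chars); mirrors Source B's inner while loop
def scanStr : List Char → List Char × List Char
  | [] => ([], [])
  | c :: cs =>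
    if c = '\\' then
      match cs with
      | [] => ([c], [])
      | c2 :: cs' => let p := scanStr cs'; (c :: c2 :: p.1, p.2)
    else if c = '"' then ([c], cs)
    else let p := scanStr cs; (c :: p.1, p.2)

-- unconditional equation lemmas for scanStr (its WF equations carry side conditions)
theorem scanStr_nil : scanStr [] = ([], []) := rfl
theorem scanStr_bs_nil : scanStr ['\\'] = (['\\'], []) := rfl
theorem scanStr_bs (c2 : Char) (cs : List Char) :
    scanStr ('\\' :: c2 :: cs) = ('\\' :: c2 :: (scanStr cs).1, (scanStr cs).2) := by
  rw [scanStr]; simp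
theorem scanStr_quote (cs : List Char) : scanStr ('"' :: cs) = (['"'], cs) := by
  rw [scanStr.eq_def]; simp
theorem scanStr_other (c : Char) (cs : List Char) (h : ¬ c = '\\') (h2 : ¬ c = '"') :
    scanStr (c :: cs) = (c :: (scanStr cs).1, (scanStr cs).2) := by
  rw [scanStr.eq_def]; simp [h, h2]

theorem scanStr_snd_length_le : ∀ cs : List Char, (scanStr cs).2.length ≤ cs.length := by
  intro cs
  induction cs using scanStr.induct with
  | case1 => simp [scanStr_nil]
  | case2 => simp [scanStr_bs_nil]
  | case3 c2 cs' ih => rw [scanStr_bs]; simp; omega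
  | case4 cs' h => simp [scanStr_quote]
  | case5 c2 cs' h h2 ih => rw [scanStr_other c2 cs' h h2]; simp; omega

-- main token loop of Source B
def emitB : List Char → Int → Option Char → List Char → List Char
  | [], _, _, acc => acc
  | c :: cs, depth, last, acc =>
    if c = '"' then
      let p := scanStr cs
      emitB p.2 depth (some '"')
        ((if 0 < depth ∧ (last = some '}' ∨ last = some ']' ∨ last = some '"') then acc ++ [','] else acc)
          ++ c :: p.1)
    else if PySem.Chars.isspace c then
      emitB (cs.dropWhile PySem.Chars.isspace) depth last (acc ++ c :: cs.takeWhile PySem.Chars.isspace)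
    else
      emitB cs (if c = '[' then depth + 1 else if c = ']' then max 0 (depth - 1) else depth) (some c)
        ((if (c = '{' ∨ c = '[') ∧ 0 < depth ∧ (last = some '}' ∨ last = some ']' ∨ last = some '"')
            then acc ++ [','] else acc) ++ [c])
termination_by cs _ _ _ => cs.length
decreasing_by
  · exact Nat.lt_succ_of_le (scanStr_snd_length_le cs)
  · exact Nat.lt_succ_of_le (List.length_dropWhile_le _ _)
  · exact Nat.lt_succ_self _

def insert_missing_commas_in_arrays_py_alt (payload : String) : String :=
  String.ofList (emitB payload.toList 0 none [])

-- ===== PRECONDITION & SPEC =====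
def Spec_insert_missing_commas_in_arrays_py (payload : String) (out : String) : Prop := out = insert_missing_commas_in_arrays_py_alt payload
instance (payload : String) (out : String) : Decidable (Spec_insert_missing_commas_in_arrays_py payload out) := by unfold Spec_insert_missing_commas_in_arrays_py; infer_instance

-- ===== CLAIM (what is proved, stated in full; the proofs are below) =====
def Claim_equal_insert_missing_commas_in_arrays_py : Prop := ∀ (payload : String), Dom_insert_missing_commas_in_arrays_py payload → Spec_insert_missing_commas_in_arrays_py payload (insert_missing_commas_in_arrays_py payload)

-- ===== LEMMAS AND PROOFS =====

-- step lemmas for A's machine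
theorem stepA_str_esc (res : List Char) (depth : Int) (last : Option Char) (c : Char) :
    stepA (res, true, true, depth, last) c = (res ++ [c], true, false, depth, last) := by
  simp [stepA]
theorem stepA_str_bs (res : List Char) (depth : Int) (last : Option Char) :
    stepA (res, true, false, depth, last) '\\' = (res ++ ['\\'], true, true, depth, last) := by
  simp [stepA]
theorem stepA_str_close (res : List Char) (depth : Int) (last : Option Char) :
    stepA (res, true, false, depth, last) '"' = (res ++ ['"'], false, false, depth, some '"') := by
  simp [stepA]
theorem stepA_str (res : List Char) (depth : Int) (last : Option Char) (c : Char)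
    (h : ¬ c = '\\') (h2 : ¬ c = '"') :
    stepA (res, true, false, depth, last) c = (res ++ [c], true, false, depth, last) := by
  simp [stepA, h, h2]
theorem stepA_ws (res : List Char) (esc : Bool) (depth : Int) (last : Option Char) (c : Char)
    (hs : PySem.Chars.isspace c = true) :
    stepA (res, false, esc, depth, last) c = (res ++ [c], false, esc, depth, last) := by
  simp [stepA, hs]
theorem stepA_quote (res : List Char) (esc : Bool) (depth : Int) (last : Option Char) :
    stepA (res, false, esc, depth, last) '"' =
      ((if 0 < depth ∧ (last = some '}' ∨ last = some ']' ∨ last = some '"') then res ++ [','] else res) ++ ['"'],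
        true, esc, depth, some '"') := by
  simp [stepA, show PySem.Chars.isspace '"' = false from by decide]
theorem stepA_open (res : List Char) (esc : Bool) (depth : Int) (last : Option Char) (c : Char)
    (hob : c = '{' ∨ c = '[') :
    stepA (res, false, esc, depth, last) c =
      ((if 0 < depth ∧ (last = some '}' ∨ last = some ']' ∨ last = some '"') then res ++ [','] else res) ++ [c],
        false, esc, if c = '[' then depth + 1 else depth, some c) := by
  rcases hob with h | h <;> subst h <;>
    simp [stepA, show PySem.Chars.isspace '{' = false from by decide,
      show PySem.Chars.isspace '[' = false from by decide]
theorem stepA_other (res : List Char) (esc : Bool) (depth : Int) (last : Option Char) (c : Char)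
    (hs : ¬ PySem.Chars.isspace c = true) (h2 : ¬ c = '"') (hob : ¬ (c = '{' ∨ c = '[')) :
    stepA (res, false, esc, depth, last) c =
      (res ++ [c], false, esc, if c = ']' then max 0 (depth - 1) else depth, some c) := by
  simp [stepA, hs, h2, hob]

-- A's in-string mode over a string-literal token: the token is appended verbatim and the
-- machine leaves string mode with last_significant = '"' (for an unterminated token the
-- remainder is empty, so only the accumulator matters)
theorem fold_inStr : ∀ (cs : List Char) (acc : List Char) (depth : Int) (last : Option Char),
    (List.foldl stepA (acc, true, false, depth, last) cs).1 =
    (List.foldl stepA (acc ++ (scanStr cs).1, false, false, depth, some '"') (scanStr cs).2).1 := by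
  intro cs
  induction cs using scanStr.induct with
  | case1 => intro acc depth last; simp [scanStr_nil]
  | case2 => intro acc depth last; simp [scanStr_bs_nil, stepA_str_bs]
  | case3 c2 cs' ih =>
      intro acc depth last
      rw [scanStr_bs]
      simp only [List.foldl_cons, stepA_str_bs, stepA_str_esc]
      rw [ih]
      simp
  | case4 cs' h =>
      intro acc depth last
      rw [scanStr_quote]
      simp [stepA_str_close]
  | case5 c2 cs' h h2 ih =>
      intro acc depth last
      rw [scanStr_other c2 cs' h h2]
      rw [List.foldl_cons, stepA_str _ _ _ _ h h2, ih]
      simp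
-- a run of whitespace is appended verbatim and changes no state
theorem fold_ws : ∀ (ws : List Char), (∀ c ∈ ws, PySem.Chars.isspace c = true) →
    ∀ (acc : List Char) (depth : Int) (last : Option Char),
    List.foldl stepA (acc, false, false, depth, last) ws = (acc ++ ws, false, false, depth, last) := by
  intro ws
  induction ws with
  | nil => intro _ acc depth last; simp
  | cons c cs ih =>
      intro h acc depth last
      have hc : PySem.Chars.isspace c = true := h c (List.mem_cons_self ..)
      rw [List.foldl_cons, stepA_ws _ _ _ _ _ hc, ih (fun x hx => h x (List.mem_cons_of_mem _ hx))]
      simp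

theorem fold_eq_emit : ∀ (n : Nat) (cs : List Char), cs.length ≤ n →
    ∀ (depth : Int) (last : Option Char) (acc : List Char),
    (List.foldl stepA (acc, false, false, depth, last) cs).1 = emitB cs depth last acc := by
  intro n
  induction n with
  | zero =>
      intro cs h depth last acc
      have : cs = [] := List.eq_nil_of_length_eq_zero (Nat.le_zero.mp h)
      subst this; simp [emitB]
  | succ n ih =>
      intro cs h depth last acc
      match cs with
      | [] => simp [emitB]
      | c :: cs' =>
        have hlen : cs'.length ≤ n := by simpa using h
        by_cases hq : c = '"'
        · subst hq
          rw [List.foldl_cons, stepA_quote]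
          rw [fold_inStr]
          rw [ih _ (le_trans (scanStr_snd_length_le cs') hlen)]
          simp [emitB, List.append_assoc]
        · by_cases hs : PySem.Chars.isspace c = true
          · rw [List.foldl_cons, stepA_ws _ _ _ _ _ hs]
            conv_lhs => rw [← List.takeWhile_append_dropWhile (p := PySem.Chars.isspace) (l := cs'),
                List.foldl_append]
            rw [fold_ws _ (fun x hx => List.mem_takeWhile_imp hx)]
            rw [ih _ (le_trans (List.length_dropWhile_le _ _) hlen)]
            simp only [emitB, if_neg hq, if_pos hs]
            simp
          · by_cases hob : c = '{' ∨ c = '['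
            · rw [List.foldl_cons, stepA_open _ _ _ _ _ hob]
              rw [ih _ hlen]
              simp only [emitB, if_neg hq, if_neg hs, hob, true_and]
              have hne : c ≠ ']' := by rcases hob with h | h <;> subst h <;> decide
              simp [hne]
            · rw [List.foldl_cons, stepA_other _ _ _ _ _ hs hq hob]
              rw [ih _ hlen]
              have hne : c ≠ '[' := fun hx => hob (Or.inr hx)
              have hne2 : c ≠ '{' := fun hx => hob (Or.inl hx)
              simp [emitB, hq, hs, hne, hne2]

-- ===== VERDICT (by name: the statement is the Claim_ definition above) =====
theorem insert_missing_commas_in_arrays_py_spec : Claim_equal_insert_missing_commas_in_arrays_py := by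
  intro payload _
  unfold Spec_insert_missing_commas_in_arrays_py insert_missing_commas_in_arrays_py insert_missing_commas_in_arrays_py_alt
  rw [fold_eq_emit payload.toList.length payload.toList le_rfl]
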